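-- pv_equiv track=rewrite | github.com/enaa99/Algorithm | programmers/search.py | solution
-- ===== SOURCE A (Python) =====
-- from collections import deque
--
-- def solution(office, k):
--     answer = -1
--     move = [[0,1], [1,0]]
--
--
--     def heater(x,y,length):
--         q = deque()
--         n,m = 0, len(office)
--
--         isVisited = [[0]*m for i in range(m)]
--
--         check = 0
--         q.append([x,y])
--         if office[x][y] == 1:
--             check +=1
--
--
--         while q:
--             a,b = q.popleft()
--             for o,p in move:
--                 xa = o+a
--                 ya = p +b
--
--                 if xa <n or ya<n or xa>=m or ya>=m or isVisited[xa][ya]: continue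
--                 if xa>=x+length or ya>=y+length: continue
--
--                 if office[xa][ya] == 1:
--                     check+=1
--
--                 isVisited[xa][ya] =1
--                 q.append([xa,ya])
--
--         return check
--     len_office = len(office)
--
--     for i in range(len_office):
--         for j in range(len_office):
--             if i+k> len_office or j+k >len_office: continue
--
--             answer = max(answer,heater(i,j,k))
--
--     return answer
-- ===== SOURCE B (Python) =====
-- def solution(office, k):
--     # Row prefix-sum table of 1-counts; each k-by-k window summed by k prefix differences.
--     n = len(office)
--     pre = []
--     for row in office:
--         p = [0]
--         for v in row:
--             p.append(p[-1] + (1 if v == 1 else 0))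
--         pre.append(p)
--     best = -1
--     for i in range(n - k + 1):
--         for j in range(n - k + 1):
--             s = 0
--             for r in range(i, i + k):
--                 s += pre[r][j + k] - pre[r][j]
--             best = max(best, s)
--     return best
-- ===== Notes on version B (the rewrite author's own statement) =====
-- stated objective: alternative
-- what changed: Replaces A's per-window BFS flood fill (deque + visited matrix rebuilt for every window) with a row prefix-sum table built once, each k-by-k window summed by k prefix differences.
-- outside the precondition, e.g. on solution([[1]], 0): A returns 1, B returns 0
import Mathlib
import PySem

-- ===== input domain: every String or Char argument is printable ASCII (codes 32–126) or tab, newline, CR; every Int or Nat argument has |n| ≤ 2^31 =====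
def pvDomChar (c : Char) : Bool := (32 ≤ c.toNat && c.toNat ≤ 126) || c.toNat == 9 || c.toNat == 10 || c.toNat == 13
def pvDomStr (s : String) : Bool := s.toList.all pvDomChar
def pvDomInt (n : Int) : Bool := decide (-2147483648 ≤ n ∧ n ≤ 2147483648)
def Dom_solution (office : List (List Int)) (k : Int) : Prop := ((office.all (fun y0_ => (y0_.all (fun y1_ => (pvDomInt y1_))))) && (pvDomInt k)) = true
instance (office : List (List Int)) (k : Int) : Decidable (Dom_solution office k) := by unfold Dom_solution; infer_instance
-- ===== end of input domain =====

-- B replaces A's per-window BFS flood fill (deque + visited matrix rebuilt per window) by a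
-- row prefix-sum table built once, each k×k window summed by k prefix differences — a genuinely
-- different algorithm. (A mutates nothing observable; equivalence is about the return value.)

-- ===== PORT A =====
-- office[u][v] (in range under Pre_; pyGetD is exact there)
def atO (office : List (List Int)) (u v : Int) : Int :=
  PySem.List.pyGetD (PySem.List.pyGetD office u []) v 0

-- isVisited[u][v] read / write (indices are guarded to [0,m) before use, as in A)
def vGet (vis : List (List Int)) (u v : Int) : Int :=
  PySem.List.pyGetD (PySem.List.pyGetD vis u []) v 0

def vSet (vis : List (List Int)) (u v : Int) : List (List Int) :=
  PySem.List.pySetD vis u (PySem.List.pySetD (PySem.List.pyGetD vis u []) v 1)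

-- one iteration of A's `for o,p in move` body, acting on the state (q, isVisited, check)
def tryMove (office : List (List Int)) (x y length m o p a b : Int)
    (st : List (Int × Int) × List (List Int) × Int) :
    List (Int × Int) × List (List Int) × Int :=
  let xa := o + a
  let ya := p + b
  if xa < 0 ∨ ya < 0 ∨ m ≤ xa ∨ m ≤ ya ∨ vGet st.2.1 xa ya ≠ 0 then st
  else if x + length ≤ xa ∨ y + length ≤ ya then st
  else (st.1 ++ [(xa, ya)],
        vSet st.2.1 xa ya,
        st.2.2 + (if atO office xa ya = 1 then 1 else 0))

-- A's `while q:` loop; the fuel 2·m²+2 strictly bounds the loop-length measure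
-- |q| + 2·#unvisited (lemma loop_eq below shows it never runs out on admitted inputs)
def heaterLoop (office : List (List Int)) (x y length m : Int) :
    Nat → List (Int × Int) → List (List Int) → Int → Int
  | 0, _, _, check => check
  | Nat.succ f, q, vis, check =>
    match q with
    | [] => check
    | (a, b) :: rest =>
      let s := tryMove office x y length m 1 0 a b
                 (tryMove office x y length m 0 1 a b (rest, vis, check))
      heaterLoop office x y length m f s.1 s.2.1 s.2.2

def heater (office : List (List Int)) (x y length : Int) : Int :=
  let m : Int := (office.length : Int)
  let vis : List (List Int) := List.replicate office.length (List.replicate office.length 0)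
  let check : Int := if atO office x y = 1 then 1 else 0
  heaterLoop office x y length m (2 * office.length * office.length + 2) [(x, y)] vis check

def solution (office : List (List Int)) (k : Int) : Int :=
  let len_office : Int := (office.length : Int)
  (PySem.List.pyRange 0 len_office 1).foldl (fun answer i =>
    (PySem.List.pyRange 0 len_office 1).foldl (fun answer j =>
      if len_office < i + k ∨ len_office < j + k then answer
      else max answer (heater office i j k)) answer) (-1)

-- ===== PORT B =====
-- p = [0]; for v in row: p.append(p[-1] + (1 if v == 1 else 0))
def prefRow (row : List Int) : List Int :=
  row.foldl (fun p v => p ++ [PySem.List.pyGetD p (-1) 0 + (if v = 1 then 1 else 0)]) [0]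

-- s = 0; for r in range(i, i+k): s += pre[r][j+k] - pre[r][j]
def winSum (pre : List (List Int)) (i j k : Int) : Int :=
  (PySem.List.pyRange i (i + k) 1).foldl (fun s r =>
    s + (PySem.List.pyGetD (PySem.List.pyGetD pre r []) (j + k) 0
         - PySem.List.pyGetD (PySem.List.pyGetD pre r []) j 0)) 0

def solution_alt (office : List (List Int)) (k : Int) : Int :=
  let n : Int := (office.length : Int)
  let pre := office.map prefRow
  (PySem.List.pyRange 0 (n - k + 1) 1).foldl (fun best i =>
    (PySem.List.pyRange 0 (n - k + 1) 1).foldl (fun best j =>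
      max best (winSum pre i j k)) best) (-1)

-- ===== PRECONDITION & SPEC =====
-- Pre_ excludes k ≤ 0 — outside the natural k×k-window domain (A's BFS still counts just the
-- start cell there) — and, when some window exists (k ≤ n), grids with a row shorter than n,
-- on which A raises IndexError (and B raises too).
def Pre_solution (office : List (List Int)) (k : Int) : Prop :=
  1 ≤ k ∧ ((office.length : Int) < k ∨ ∀ row ∈ office, office.length ≤ row.length)
instance (office : List (List Int)) (k : Int) : Decidable (Pre_solution office k) := by
  unfold Pre_solution; infer_instance

def pvWitness_solution : List (List Int) × Int := ([[1, 0], [0, 1]], 2)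

def Spec_solution (office : List (List Int)) (k : Int) (out : Int) : Prop := out = solution_alt office k
instance (office : List (List Int)) (k : Int) (out : Int) : Decidable (Spec_solution office k out) := by
  unfold Spec_solution; infer_instance

-- ===== CLAIM (what is proved, stated in full; the proofs are below) =====
def Claim_equal_solution : Prop := ∀ (office : List (List Int)) (k : Int),
  Dom_solution office k → Pre_solution office k → Spec_solution office k (solution office k)

-- ===== LEMMAS AND PROOFS =====

-- the indicator A counts and B sums
def cnt (office : List (List Int)) (u v : Int) : Int := if atO office u v = 1 then 1 else 0

-- the k×k window anchored at (x,y), as a finite set of cells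
def Rect (x y k : Int) : Finset (Int × Int) :=
  Finset.image (fun p : ℕ × ℕ => ((x + p.1 : Int), (y + p.2 : Int))) (Finset.range k.toNat ×ˢ Finset.range k.toNat)

def rectSum (office : List (List Int)) (x y k : Int) : Int :=
  ∑ c ∈ Rect x y k, cnt office c.1 c.2

lemma mem_Rect {x y k : Int} {c : Int × Int} :
    c ∈ Rect x y k ↔ x ≤ c.1 ∧ c.1 < x + k ∧ y ≤ c.2 ∧ c.2 < y + k := by
  unfold Rect
  simp only [Finset.mem_image, Finset.mem_product, Finset.mem_range, Prod.exists]
  constructor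
  · rintro ⟨a, b, ⟨ha, hb⟩, h⟩
    rw [Prod.ext_iff] at h
    simp only at h
    omega
  · rintro ⟨h1, h2, h3, h4⟩
    refine ⟨(c.1 - x).toNat, (c.2 - y).toNat, ⟨by omega, by omega⟩, ?_⟩
    rw [Prod.ext_iff]
    constructor <;> simp <;> omega

def shapeV (vis : List (List Int)) (n : ℕ) : Prop :=
  vis.length = n ∧ ∀ row ∈ vis, row.length = n

-- matrix access in Nat-index form, for the proofs
def mAt (vis : List (List Int)) (u v : ℕ) : Int := ((vis[u]?.getD [])[v]?).getD 0

lemma vGet_eq_mAt (vis : List (List Int)) (u v : Int) (hu : 0 ≤ u) (hv : 0 ≤ v) :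
    vGet vis u v = mAt vis u.toNat v.toNat := by
  lift u to ℕ using hu
  lift v to ℕ using hv
  unfold vGet mAt
  simp [PySem.List.pyGetD_natCast, List.getD_eq_getElem?_getD]

lemma vSet_eq_set (vis : List (List Int)) (a b : Int) (ha : 0 ≤ a) (hb : 0 ≤ b) :
    vSet vis a b = vis.set a.toNat ((vis[a.toNat]?.getD []).set b.toNat 1) := by
  lift a to ℕ using ha
  lift b to ℕ using hb
  unfold vSet
  simp [PySem.List.pySetD_natCast, PySem.List.pyGetD_natCast, List.getD_eq_getElem?_getD]

lemma vGet_replicate (n : ℕ) (u v : Int) (hu : 0 ≤ u) (hv : 0 ≤ v) :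
    vGet (List.replicate n (List.replicate n 0)) u v = 0 := by
  rw [vGet_eq_mAt _ _ _ hu hv]
  unfold mAt
  rcases Nat.lt_or_ge u.toNat n with h | h
  · rcases Nat.lt_or_ge v.toNat n with h2 | h2 <;>
      simp [List.getElem?_replicate, h, h2]
  · simp [List.getElem?_replicate, Nat.not_lt.mpr h]

lemma shapeV_replicate (n : ℕ) : shapeV (List.replicate n (List.replicate n (0:Int))) n := by
  constructor
  · simp
  · intro row h
    rw [List.eq_of_mem_replicate h]
    simp

lemma shapeV_vSet {vis : List (List Int)} {n : ℕ} (hs : shapeV vis n) (a b : Int)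
    (ha : 0 ≤ a) (hb : 0 ≤ b) : shapeV (vSet vis a b) n := by
  rw [vSet_eq_set vis a b ha hb]
  rcases Nat.lt_or_ge a.toNat vis.length with hlt | hge
  · constructor
    · simp [hs.1]
    · intro row hrow
      rcases List.mem_or_eq_of_mem_set hrow with h | h
      · exact hs.2 _ h
      · subst h
        rw [List.length_set, List.getElem?_eq_getElem hlt]
        exact hs.2 _ (List.getElem_mem hlt)
  · rw [List.set_eq_of_length_le hge]
    exact hs

lemma vGet_vSet {vis : List (List Int)} {n : ℕ} (hs : shapeV vis n) (a b u v : Int)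
    (ha : 0 ≤ a) (ha2 : a < (n : Int)) (hb : 0 ≤ b) (hb2 : b < (n : Int))
    (hu : 0 ≤ u) (hv : 0 ≤ v) :
    vGet (vSet vis a b) u v = if u = a ∧ v = b then 1 else vGet vis u v := by
  have hlen : vis.length = n := hs.1
  have haN : a.toNat < vis.length := by omega
  have hrlen : vis[a.toNat].length = n := hs.2 _ (List.getElem_mem haN)
  rw [vSet_eq_set vis a b ha hb, vGet_eq_mAt _ _ _ hu hv, vGet_eq_mAt _ _ _ hu hv]
  unfold mAt
  rw [List.getElem?_eq_getElem haN]
  simp only [Option.getD_some]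
  rw [List.getElem?_set_of_lt' _ _ haN]
  by_cases hua : a.toNat = u.toNat
  · rw [if_pos hua]
    simp only [Option.getD_some]
    rw [List.getElem?_set_of_lt' _ _ (show b.toNat < vis[a.toNat].length by omega)]
    by_cases hvb : b.toNat = v.toNat
    · rw [if_pos hvb]
      have huv : u = a ∧ v = b := by omega
      simp [huv]
    · rw [if_neg hvb]
      have huv : ¬ (u = a ∧ v = b) := by omega
      rw [if_neg huv, ← hua, List.getElem?_eq_getElem haN]
      simp only [Option.getD_some]
  · rw [if_neg hua]
    have huv : ¬ (u = a ∧ v = b) := by omega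
    rw [if_neg huv]

def Vin (vis : List (List Int)) (x y : Int) (c : Int × Int) : Prop :=
  vGet vis c.1 c.2 ≠ 0 ∨ c = (x, y)

def Closed (vis : List (List Int)) (x y k : Int) (c : Int × Int) : Prop :=
  ∀ c' ∈ [((c.1, c.2 + 1) : Int × Int), ((c.1 + 1, c.2) : Int × Int)],
    c' ∈ Rect x y k → vGet vis c'.1 c'.2 ≠ 0

def InvCore (office : List (List Int)) (x y k : Int)
    (q : List (Int × Int)) (vis : List (List Int)) (check : Int) : Prop :=
  shapeV vis office.length ∧
  (∀ c : Int × Int, 0 ≤ c.1 → 0 ≤ c.2 → vGet vis c.1 c.2 ≠ 0 → c ∈ Rect x y k ∧ c ≠ (x, y)) ∧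
  check = cnt office x y +
    ∑ c ∈ (Rect x y k).filter (fun c => vGet vis c.1 c.2 ≠ 0), cnt office c.1 c.2 ∧
  (∀ c ∈ q, Vin vis x y c ∧ c ∈ Rect x y k)

def unmarked (vis : List (List Int)) (x y k : Int) : ℕ :=
  ((Rect x y k).filter (fun c => vGet vis c.1 c.2 = 0)).card

def LoopInv (office : List (List Int)) (x y k : Int)
    (q : List (Int × Int)) (vis : List (List Int)) (check : Int) : Prop :=
  InvCore office x y k q vis check ∧
  ∀ c : Int × Int, c ∈ Rect x y k → Vin vis x y c → c ∉ q → Closed vis x y k c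

lemma Rect_coord {x y k : Int} {c : Int × Int} (hx : 0 ≤ x) (hy : 0 ≤ y)
    (hxk : x + k ≤ (n : Int)) (hyk : y + k ≤ (n : Int)) (hc : c ∈ Rect x y k) :
    0 ≤ c.1 ∧ c.1 < (n : Int) ∧ 0 ≤ c.2 ∧ c.2 < (n : Int) := by
  have h := mem_Rect.mp hc
  omega

lemma InvCore_push (office : List (List Int)) (x y k : Int)
    (q : List (Int × Int)) (vis : List (List Int)) (check : Int)
    (hx : 0 ≤ x) (hy : 0 ≤ y)
    (hxk : x + k ≤ (office.length : Int)) (hyk : y + k ≤ (office.length : Int))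
    (hcore : InvCore office x y k q vis check)
    (c1 c2 : Int) (hmem : ((c1, c2) : Int × Int) ∈ Rect x y k)
    (hne : ((c1, c2) : Int × Int) ≠ (x, y)) (hunm : vGet vis c1 c2 = 0) :
    InvCore office x y k (q ++ [(c1, c2)]) (vSet vis c1 c2)
      (check + (if atO office c1 c2 = 1 then 1 else 0)) ∧
    unmarked (vSet vis c1 c2) x y k + 1 = unmarked vis x y k ∧
    (∀ u v : Int, 0 ≤ u → 0 ≤ v →
      (vGet (vSet vis c1 c2) u v ≠ 0 ↔ vGet vis u v ≠ 0 ∨ (u = c1 ∧ v = c2))) := by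
  obtain ⟨hcb1, hcb2, hcb3, hcb4⟩ := Rect_coord (n := office.length) hx hy hxk hyk hmem
  simp only at hcb1 hcb2 hcb3 hcb4
  have hset : ∀ u v : Int, 0 ≤ u → 0 ≤ v →
      vGet (vSet vis c1 c2) u v = if u = c1 ∧ v = c2 then 1 else vGet vis u v :=
    fun u v hu hv => vGet_vSet hcore.1 c1 c2 u v hcb1 hcb2 hcb3 hcb4 hu hv
  have hiff : ∀ u v : Int, 0 ≤ u → 0 ≤ v →
      (vGet (vSet vis c1 c2) u v ≠ 0 ↔ vGet vis u v ≠ 0 ∨ (u = c1 ∧ v = c2)) := by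
    intro u v hu hv
    rw [hset u v hu hv]
    by_cases h : u = c1 ∧ v = c2
    · simp [h]
    · simp [h]
  have hfil : (Rect x y k).filter (fun c => vGet (vSet vis c1 c2) c.1 c.2 ≠ 0) =
      insert ((c1, c2) : Int × Int) ((Rect x y k).filter (fun c => vGet vis c.1 c.2 ≠ 0)) := by
    ext c
    simp only [Finset.mem_filter, Finset.mem_insert]
    constructor
    · rintro ⟨hcR, hcm⟩
      obtain ⟨d1, d2, d3, d4⟩ := Rect_coord (n := office.length) hx hy hxk hyk hcR
      rcases (hiff c.1 c.2 d1 d3).mp hcm with h | h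
      · exact Or.inr ⟨hcR, h⟩
      · left
        obtain ⟨h1, h2⟩ := h
        exact Prod.ext h1 h2
    · rintro (rfl | ⟨hcR, hcm⟩)
      · refine ⟨hmem, ?_⟩
        rw [(hiff c1 c2 hcb1 hcb3)]
        exact Or.inr ⟨rfl, rfl⟩
      · obtain ⟨d1, d2, d3, d4⟩ := Rect_coord (n := office.length) hx hy hxk hyk hcR
        exact ⟨hcR, (hiff c.1 c.2 d1 d3).mpr (Or.inl hcm)⟩
  have hnotin : ((c1, c2) : Int × Int) ∉ (Rect x y k).filter (fun c => vGet vis c.1 c.2 ≠ 0) := by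
    simp [Finset.mem_filter, hunm]
  refine ⟨⟨shapeV_vSet hcore.1 c1 c2 hcb1 hcb3, ?_, ?_, ?_⟩, ?_, hiff⟩
  · intro c h1 h2 h3
    rcases (hiff c.1 c.2 h1 h2).mp h3 with h | h
    · exact hcore.2.1 c h1 h2 h
    · obtain ⟨e1, e2⟩ := h
      have : c = (c1, c2) := Prod.ext e1 e2
      rw [this]
      exact ⟨hmem, hne⟩
  · rw [hfil, Finset.sum_insert hnotin, hcore.2.2.1]
    simp only [cnt]
    ring
  · intro c hc
    rcases List.mem_append.mp hc with h | h
    · obtain ⟨hV, hR⟩ := hcore.2.2.2 c h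
      refine ⟨?_, hR⟩
      rcases hV with h' | h'
      · obtain ⟨d1, d2, d3, d4⟩ := Rect_coord (n := office.length) hx hy hxk hyk hR
        exact Or.inl ((hiff c.1 c.2 d1 d3).mpr (Or.inl h'))
      · exact Or.inr h'
    · have : c = ((c1, c2) : Int × Int) := by simpa using h
      subst this
      refine ⟨Or.inl ?_, hmem⟩
      exact (hiff c1 c2 hcb1 hcb3).mpr (Or.inr ⟨rfl, rfl⟩)
  · have hfil0 : (Rect x y k).filter (fun c => vGet (vSet vis c1 c2) c.1 c.2 = 0) =
        ((Rect x y k).filter (fun c => vGet vis c.1 c.2 = 0)).erase ((c1, c2) : Int × Int) := by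
      ext c
      simp only [Finset.mem_filter, Finset.mem_erase]
      constructor
      · rintro ⟨hcR, hcm⟩
        obtain ⟨d1, d2, d3, d4⟩ := Rect_coord (n := office.length) hx hy hxk hyk hcR
        have := hset c.1 c.2 d1 d3
        by_cases h : c.1 = c1 ∧ c.2 = c2
        · rw [this, if_pos h] at hcm
          omega
        · rw [this, if_neg h] at hcm
          refine ⟨?_, hcR, hcm⟩
          intro hcc
          rw [hcc] at h
          simp at h
      · rintro ⟨hne', hcR, hcm⟩
        obtain ⟨d1, d2, d3, d4⟩ := Rect_coord (n := office.length) hx hy hxk hyk hcR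
        refine ⟨hcR, ?_⟩
        rw [hset c.1 c.2 d1 d3, if_neg ?_]
        · exact hcm
        · intro h
          exact hne' (Prod.ext h.1 h.2)
    have hin0 : ((c1, c2) : Int × Int) ∈ (Rect x y k).filter (fun c => vGet vis c.1 c.2 = 0) := by
      simp [Finset.mem_filter, hmem, hunm]
    unfold unmarked
    rw [hfil0, Finset.card_erase_of_mem hin0]
    have := Finset.card_pos.mpr ⟨_, hin0⟩
    omega

lemma tryMove_spec (office : List (List Int)) (x y k o p a b : Int)
    (st : List (Int × Int) × List (List Int) × Int)
    (ho : 0 ≤ o) (hp : 0 ≤ p)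
    (hx : 0 ≤ x) (hy : 0 ≤ y)
    (hxk : x + k ≤ (office.length : Int)) (hyk : y + k ≤ (office.length : Int))
    (hab : ((a, b) : Int × Int) ∈ Rect x y k) :
    (tryMove office x y k (office.length : Int) o p a b st = st ∧
      (((o + a, p + b) : Int × Int) ∈ Rect x y k → vGet st.2.1 (o + a) (p + b) ≠ 0)) ∨
    (((o + a, p + b) : Int × Int) ∈ Rect x y k ∧ vGet st.2.1 (o + a) (p + b) = 0 ∧
      tryMove office x y k (office.length : Int) o p a b st =
        (st.1 ++ [((o + a, p + b) : Int × Int)], vSet st.2.1 (o + a) (p + b),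
         st.2.2 + (if atO office (o + a) (p + b) = 1 then 1 else 0))) := by
  have hb := mem_Rect.mp hab
  simp only at hb
  simp only [tryMove]
  by_cases hg1 : o + a < 0 ∨ p + b < 0 ∨ (office.length : Int) ≤ o + a ∨
      (office.length : Int) ≤ p + b ∨ vGet st.2.1 (o + a) (p + b) ≠ 0
  · rw [if_pos hg1]
    left
    refine ⟨rfl, ?_⟩
    intro hc'
    have hcb := mem_Rect.mp hc'
    simp only at hcb
    rcases hg1 with h | h | h | h | h
    · omega
    · omega
    · omega
    · omega
    · exact h
  · rw [if_neg hg1]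
    by_cases hg2 : x + k ≤ o + a ∨ y + k ≤ p + b
    · rw [if_pos hg2]
      left
      refine ⟨rfl, ?_⟩
      intro hc'
      have hcb := mem_Rect.mp hc'
      simp only at hcb
      rcases hg2 with h | h <;> omega
    · rw [if_neg hg2]
      right
      push_neg at hg1 hg2
      refine ⟨mem_Rect.mpr ?_, hg1.2.2.2.2, rfl⟩
      simp only
      omega

lemma move_pres (office : List (List Int)) (x y k o p a b : Int)
    (st : List (Int × Int) × List (List Int) × Int)
    (ho : 0 ≤ o) (hp : 0 ≤ p) (hop : 1 ≤ o + p)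
    (hx : 0 ≤ x) (hy : 0 ≤ y)
    (hxk : x + k ≤ (office.length : Int)) (hyk : y + k ≤ (office.length : Int))
    (hab : ((a, b) : Int × Int) ∈ Rect x y k)
    (hcore : InvCore office x y k st.1 st.2.1 st.2.2) :
    InvCore office x y k (tryMove office x y k (office.length : Int) o p a b st).1
      (tryMove office x y k (office.length : Int) o p a b st).2.1
      (tryMove office x y k (office.length : Int) o p a b st).2.2 ∧
    (∀ u v : Int, 0 ≤ u → 0 ≤ v → vGet st.2.1 u v ≠ 0 →
      vGet (tryMove office x y k (office.length : Int) o p a b st).2.1 u v ≠ 0) ∧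
    (∀ u v : Int, 0 ≤ u → 0 ≤ v →
      vGet (tryMove office x y k (office.length : Int) o p a b st).2.1 u v ≠ 0 →
      vGet st.2.1 u v ≠ 0 ∨ ((u, v) : Int × Int) ∈ (tryMove office x y k (office.length : Int) o p a b st).1) ∧
    (((o + a, p + b) : Int × Int) ∈ Rect x y k →
      vGet (tryMove office x y k (office.length : Int) o p a b st).2.1 (o + a) (p + b) ≠ 0) ∧
    (tryMove office x y k (office.length : Int) o p a b st).1.length +
      2 * unmarked (tryMove office x y k (office.length : Int) o p a b st).2.1 x y k ≤
      st.1.length + 2 * unmarked st.2.1 x y k ∧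
    (∀ c ∈ st.1, c ∈ (tryMove office x y k (office.length : Int) o p a b st).1) := by
  rcases tryMove_spec office x y k o p a b st ho hp hx hy hxk hyk hab with
    ⟨heq, hcl⟩ | ⟨hm, hz, heq⟩
  · rw [heq]
    exact ⟨hcore, fun u v _ _ h => h, fun u v _ _ h => Or.inl h, hcl, le_refl _, fun c h => h⟩
  · have hne : ((o + a, p + b) : Int × Int) ≠ (x, y) := by
      have h1 := mem_Rect.mp hab
      simp only at h1
      intro h
      rw [Prod.ext_iff] at h
      simp only at h
      omega
    obtain ⟨hcore', hunm, hiff⟩ := InvCore_push office x y k st.1 st.2.1 st.2.2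
      hx hy hxk hyk hcore (o + a) (p + b) hm hne hz
    rw [heq]
    refine ⟨hcore', ?_, ?_, ?_, ?_, ?_⟩
    · intro u v hu hv h
      exact (hiff u v hu hv).mpr (Or.inl h)
    · intro u v hu hv h
      rcases (hiff u v hu hv).mp h with h' | h'
      · exact Or.inl h'
      · right
        simp only
        rw [List.mem_append]
        right
        simp [Prod.ext_iff, h'.1, h'.2]
    · intro _
      exact (hiff (o + a) (p + b) (by have := mem_Rect.mp hm; simp only at this; omega)
        (by have := mem_Rect.mp hm; simp only at this; omega)).mpr (Or.inr ⟨rfl, rfl⟩)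
    · simp only [List.length_append, List.length_cons, List.length_nil]
      omega
    · intro c h
      simp only [List.mem_append]
      exact Or.inl h

lemma step_pres (office : List (List Int)) (x y k a b : Int)
    (rest : List (Int × Int)) (vis : List (List Int)) (check : Int)
    (hx : 0 ≤ x) (hy : 0 ≤ y)
    (hxk : x + k ≤ (office.length : Int)) (hyk : y + k ≤ (office.length : Int))
    (hInv : LoopInv office x y k ((a, b) :: rest) vis check) :
    LoopInv office x y k
      (tryMove office x y k (office.length : Int) 1 0 a b
        (tryMove office x y k (office.length : Int) 0 1 a b (rest, vis, check))).1
      (tryMove office x y k (office.length : Int) 1 0 a b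
        (tryMove office x y k (office.length : Int) 0 1 a b (rest, vis, check))).2.1
      (tryMove office x y k (office.length : Int) 1 0 a b
        (tryMove office x y k (office.length : Int) 0 1 a b (rest, vis, check))).2.2 ∧
    (tryMove office x y k (office.length : Int) 1 0 a b
        (tryMove office x y k (office.length : Int) 0 1 a b (rest, vis, check))).1.length +
      2 * unmarked (tryMove office x y k (office.length : Int) 1 0 a b
        (tryMove office x y k (office.length : Int) 0 1 a b (rest, vis, check))).2.1 x y k + 1 ≤
      (rest.length + 1) + 2 * unmarked vis x y k := by
  obtain ⟨hcore, hclosed⟩ := hInv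
  obtain ⟨hVab, habR⟩ := hcore.2.2.2 (a, b) (by simp)
  have hcore0 : InvCore office x y k rest vis check :=
    ⟨hcore.1, hcore.2.1, hcore.2.2.1, fun c hc => hcore.2.2.2 c (List.mem_cons_of_mem _ hc)⟩
  obtain ⟨core1, mono1, new1, nbr1, meas1, sub1⟩ :=
    move_pres office x y k 0 1 a b (rest, vis, check) (by norm_num) (by norm_num) (by norm_num)
      hx hy hxk hyk habR hcore0
  obtain ⟨core2, mono2, new2, nbr2, meas2, sub2⟩ :=
    move_pres office x y k 1 0 a b (tryMove office x y k (office.length : Int) 0 1 a b (rest, vis, check))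
      (by norm_num) (by norm_num) (by norm_num) hx hy hxk hyk habR core1
  set st1 := tryMove office x y k (office.length : Int) 0 1 a b (rest, vis, check) with hst1
  set st2 := tryMove office x y k (office.length : Int) 1 0 a b st1 with hst2
  rw [Int.zero_add, Int.add_comm 1 b] at nbr1
  rw [Int.zero_add, Int.add_comm 1 a] at nbr2
  constructor
  · refine ⟨core2, ?_⟩
    intro c hcR hVin2 hnq2
    obtain ⟨d1, d2, d3, d4⟩ := Rect_coord (n := office.length) hx hy hxk hyk hcR
    by_cases hcab : c = ((a, b) : Int × Int)
    · subst hcab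
      intro c' hc' hc'R
      obtain ⟨e1, e2, e3, e4⟩ := Rect_coord (n := office.length) hx hy hxk hyk hc'R
      simp only [List.mem_cons, List.not_mem_nil, or_false] at hc'
      rcases hc' with rfl | rfl
      · exact mono2 _ _ e1 e3 (nbr1 hc'R)
      · exact nbr2 hc'R
    · have hVin0 : Vin vis x y c := by
        rcases hVin2 with hm2 | hstart
        · rcases new2 c.1 c.2 d1 d3 hm2 with hm1 | hq2
          · rcases new1 c.1 c.2 d1 d3 hm1 with hm0 | hq1
            · exact Or.inl hm0
            · exact absurd (sub2 _ hq1) (by simpa using hnq2)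
          · exact absurd hq2 (by simpa using hnq2)
        · exact Or.inr hstart
      have hnq0 : c ∉ (a, b) :: rest := by
        intro h
        rcases List.mem_cons.mp h with h' | h'
        · exact hcab h'
        · exact hnq2 (sub2 _ (sub1 _ h'))
      have hcl := hclosed c hcR hVin0 hnq0
      intro c' hc' hc'R
      obtain ⟨e1, e2, e3, e4⟩ := Rect_coord (n := office.length) hx hy hxk hyk hc'R
      exact mono2 _ _ e1 e3 (mono1 _ _ e1 e3 (hcl c' hc' hc'R))
  · have e0 : ((rest, vis, check) : List (Int × Int) × List (List Int) × Int).2.1 = vis := rfl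
    have e1 : ((rest, vis, check) : List (Int × Int) × List (List Int) × Int).1 = rest := rfl
    rw [e0, e1] at meas1
    omega

lemma loop_eq (office : List (List Int)) (x y k : Int)
    (hx : 0 ≤ x) (hy : 0 ≤ y) (hk : 1 ≤ k)
    (hxk : x + k ≤ (office.length : Int)) (hyk : y + k ≤ (office.length : Int)) :
    ∀ (fuel : ℕ) (q : List (Int × Int)) (vis : List (List Int)) (check : Int),
      LoopInv office x y k q vis check →
      q.length + 2 * unmarked vis x y k ≤ fuel →
      heaterLoop office x y k (office.length : Int) fuel q vis check = rectSum office x y k := by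
  intro fuel
  induction fuel with
  | zero =>
    intro q vis check hInv hb
    exfalso
    have hstart : ((x, y) : Int × Int) ∈ Rect x y k := mem_Rect.mpr (by simp only; omega)
    have hz : vGet vis x y = 0 := by
      by_contra h
      exact (hInv.1.2.1 (x, y) hx hy h).2 rfl
    have hmem : ((x, y) : Int × Int) ∈ (Rect x y k).filter (fun c => vGet vis c.1 c.2 = 0) := by
      simp [Finset.mem_filter, hstart, hz]
    have := Finset.card_pos.mpr ⟨_, hmem⟩
    unfold unmarked at hb
    omega
  | succ f ih =>
    rintro (_ | ⟨⟨a, b⟩, rest⟩) vis check hInv hb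
    · -- queue empty: every window cell is reached, so check is the full window sum
      simp only [heaterLoop]
      obtain ⟨hcore, hclosed⟩ := hInv
      have hstart : ((x, y) : Int × Int) ∈ Rect x y k := mem_Rect.mpr (by simp only; omega)
      have reach : ∀ s : ℕ, ∀ c : Int × Int, c ∈ Rect x y k →
          (c.1 + c.2 - x - y).toNat ≤ s → Vin vis x y c := by
        intro s
        induction s with
        | zero =>
          intro c hc hle
          have hcb := mem_Rect.mp hc
          right
          exact Prod.ext (by omega) (by omega)
        | succ s ihs =>
          intro c hc hle
          have hcb := mem_Rect.mp hc
          by_cases h0 : (c.1 + c.2 - x - y).toNat ≤ s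
          · exact ihs c hc h0
          · by_cases h1 : x < c.1
            · have hdR : ((c.1 - 1, c.2) : Int × Int) ∈ Rect x y k :=
                mem_Rect.mpr (by simp only; omega)
              have hVd : Vin vis x y (c.1 - 1, c.2) := ihs _ hdR (by simp only; omega)
              have e1 : ((c.1 - 1 + 1, c.2) : Int × Int) = c := by
                have h : c.1 - 1 + 1 = c.1 := by omega
                rw [h]
              have hm := hclosed _ hdR hVd (List.not_mem_nil) (c.1 - 1 + 1, c.2)
                (by simp) (by rw [e1]; exact hc)
              simp only at hm
              left
              have h : c.1 - 1 + 1 = c.1 := by omega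
              rwa [h] at hm
            · have h2 : y < c.2 := by omega
              have hdR : ((c.1, c.2 - 1) : Int × Int) ∈ Rect x y k :=
                mem_Rect.mpr (by simp only; omega)
              have hVd : Vin vis x y (c.1, c.2 - 1) := ihs _ hdR (by simp only; omega)
              have e1 : ((c.1, c.2 - 1 + 1) : Int × Int) = c := by
                have h : c.2 - 1 + 1 = c.2 := by omega
                rw [h]
              have hm := hclosed _ hdR hVd (List.not_mem_nil) (c.1, c.2 - 1 + 1)
                (by simp) (by rw [e1]; exact hc)
              simp only at hm
              left
              have h : c.2 - 1 + 1 = c.2 := by omega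
              rwa [h] at hm
      have hall : ∀ c : Int × Int, c ∈ Rect x y k → c ≠ (x, y) → vGet vis c.1 c.2 ≠ 0 := by
        intro c hc hne
        rcases reach (c.1 + c.2 - x - y).toNat c hc le_rfl with h | h
        · exact h
        · exact absurd h hne
      have hfil : (Rect x y k).filter (fun c => vGet vis c.1 c.2 ≠ 0) =
          (Rect x y k).erase ((x, y) : Int × Int) := by
        ext c
        simp only [Finset.mem_filter, Finset.mem_erase]
        constructor
        · rintro ⟨hcR, hm⟩
          obtain ⟨d1, d2, d3, d4⟩ := Rect_coord (n := office.length) hx hy hxk hyk hcR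
          exact ⟨(hcore.2.1 c d1 d3 hm).2, hcR⟩
        · rintro ⟨hne, hcR⟩
          exact ⟨hcR, hall c hcR hne⟩
      rw [hcore.2.2.1, hfil]
      unfold rectSum
      exact Finset.add_sum_erase (Rect x y k) (fun c => cnt office c.1 c.2) hstart
    · simp only [heaterLoop]
      obtain ⟨hInv2, hmeas⟩ := step_pres office x y k a b rest vis check hx hy hxk hyk hInv
      apply ih _ _ _ hInv2
      simp only [List.length_cons] at hb
      omega

lemma heater_eq (office : List (List Int)) (x y k : Int)
    (hx : 0 ≤ x) (hy : 0 ≤ y) (hk : 1 ≤ k)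
    (hxk : x + k ≤ (office.length : Int)) (hyk : y + k ≤ (office.length : Int)) :
    heater office x y k = rectSum office x y k := by
  have hstart : ((x, y) : Int × Int) ∈ Rect x y k := mem_Rect.mpr (by simp only; omega)
  have hrepl : ∀ u v : Int, 0 ≤ u → 0 ≤ v →
      vGet (List.replicate office.length (List.replicate office.length 0)) u v = 0 :=
    fun u v hu hv => vGet_replicate office.length u v hu hv
  simp only [heater]
  apply loop_eq office x y k hx hy hk hxk hyk
  · refine ⟨⟨shapeV_replicate _, ?_, ?_, ?_⟩, ?_⟩
    · intro c h1 h2 h3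
      exact absurd (hrepl c.1 c.2 h1 h2) h3
    · have hf : (Rect x y k).filter
          (fun c => vGet (List.replicate office.length (List.replicate office.length 0)) c.1 c.2 ≠ 0) = ∅ := by
        apply Finset.filter_false_of_mem
        intro c hc
        obtain ⟨d1, d2, d3, d4⟩ := Rect_coord (n := office.length) hx hy hxk hyk hc
        simp [hrepl c.1 c.2 d1 d3]
      rw [hf]
      simp [cnt]
    · intro c hc
      have hcx : c = ((x, y) : Int × Int) := by simpa using hc
      subst hcx
      exact ⟨Or.inr rfl, hstart⟩
    · intro c hcR hVin hnq
      rcases hVin with hm | rfl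
      · obtain ⟨d1, d2, d3, d4⟩ := Rect_coord (n := office.length) hx hy hxk hyk hcR
        exact absurd (hrepl c.1 c.2 d1 d3) hm
      · exact absurd (by simp) hnq
  · have h1 : unmarked (List.replicate office.length (List.replicate office.length 0)) x y k ≤
        (Rect x y k).card := Finset.card_filter_le _ _
    have h2 : (Rect x y k).card ≤ k.toNat * k.toNat := by
      refine le_trans Finset.card_image_le ?_
      rw [Finset.card_product]
      simp
    have h3 : k.toNat ≤ office.length := by omega
    have h4 : k.toNat * k.toNat ≤ office.length * office.length := Nat.mul_le_mul h3 h3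
    have h5 : 2 * office.length * office.length + 2 = 2 * (office.length * office.length) + 2 := by
      ring
    simp only [List.length_cons, List.length_nil]
    rw [h5]
    omega

-- ===== B-side lemmas =====

def indOne (v : Int) : Int := if v = 1 then 1 else 0

def scanCnt (s : Int) : List Int → List Int
  | [] => []
  | v :: r => (s + indOne v) :: scanCnt (s + indOne v) r

lemma prefRow_foldl : ∀ (row : List Int) (acc : List Int) (s : Int),
    acc ≠ [] → PySem.List.pyGetD acc (-1) 0 = s →
    row.foldl (fun p v => p ++ [PySem.List.pyGetD p (-1) 0 + (if v = 1 then 1 else 0)]) acc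
      = acc ++ scanCnt s row := by
  intro row
  induction row with
  | nil =>
    intro acc s h1 h2
    simp [scanCnt]
  | cons v r ih =>
    intro acc s h1 h2
    simp only [List.foldl_cons, scanCnt]
    rw [h2]
    rw [ih (acc ++ [s + (if v = 1 then 1 else 0)]) (s + indOne v) (by simp)
        (by rw [PySem.List.pyGetD_neg_one_append_singleton]; simp [indOne])]
    simp [indOne]

lemma prefRow_eq (row : List Int) : prefRow row = 0 :: scanCnt 0 row := by
  unfold prefRow
  rw [prefRow_foldl row [0] 0 (by simp) (by decide)]
  simp

lemma scanCnt_getD : ∀ (row : List Int) (s : Int) (t : ℕ), t < row.length →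
    (scanCnt s row).getD t 0 = s + ∑ b ∈ Finset.range (t + 1), indOne (row.getD b 0) := by
  intro row
  induction row with
  | nil => intro s t h; simp at h
  | cons v r ih =>
    intro s t h
    cases t with
    | zero =>
      rw [show scanCnt s (v :: r) = (s + indOne v) :: scanCnt (s + indOne v) r from rfl]
      simp
    | succ t' =>
      simp only [scanCnt, List.getD_cons_succ]
      rw [ih (s + indOne v) t' (by simpa using h)]
      simp only [Finset.sum_range_succ']
      simp only [show ∀ (m : ℕ) (d : Int), (v :: r).getD (m + 1) d = r.getD m d from fun _ _ => rfl,
        show ∀ (d : Int), (v :: r).getD 0 d = v from fun _ => rfl]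
      ring

lemma prefRow_getD (row : List Int) (t : ℕ) (ht : t ≤ row.length) :
    (prefRow row).getD t 0 = ∑ b ∈ Finset.range t, indOne (row.getD b 0) := by
  rw [prefRow_eq]
  cases t with
  | zero => simp
  | succ t' =>
    simp only [List.getD_cons_succ]
    rw [scanCnt_getD row 0 t' (by omega)]
    simp

lemma foldl_add_sum (g : Int → Int) (init : Int) : ∀ (nn : ℕ) (a b : Int), (b - a).toNat = nn →
    (PySem.List.pyRange a b 1).foldl (fun s r => s + g r) init
      = init + ∑ t ∈ Finset.range nn, g (a + t) := by
  intro nn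
  induction nn with
  | zero =>
    intro a b h
    rw [PySem.List.pyRange_one_eq_nil (by omega)]
    simp
  | succ m ih =>
    intro a b h
    have hab : a ≤ b - 1 := by omega
    have hsplit : PySem.List.pyRange a b 1 = PySem.List.pyRange a (b - 1) 1 ++ [b - 1] := by
      have h2 := PySem.List.pyRange_one_succ_right (a := a) (b := b - 1) hab
      rw [show b - 1 + 1 = b from by ring] at h2
      exact h2
    rw [hsplit, List.foldl_append]
    simp only [List.foldl_cons, List.foldl_nil]
    rw [ih a (b - 1) (by omega)]
    rw [Finset.sum_range_succ]
    rw [show a + (m : Int) = b - 1 from by omega]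
    ring

lemma rectSum_eq_double (office : List (List Int)) (x y k : Int) :
    rectSum office x y k =
      ∑ a ∈ Finset.range k.toNat, ∑ b ∈ Finset.range k.toNat, cnt office (x + a) (y + b) := by
  unfold rectSum Rect
  rw [Finset.sum_image (by
    intro p hp q hq h
    rw [Prod.ext_iff] at h
    simp only at h
    have e1 : p.1 = q.1 := by omega
    have e2 : p.2 = q.2 := by omega
    exact Prod.ext e1 e2)]
  rw [Finset.sum_product]

lemma cnt_eq_indOne (office : List (List Int)) (u v : Int) (hu : 0 ≤ u) (hv : 0 ≤ v) :
    cnt office u v = indOne ((office.getD u.toNat []).getD v.toNat 0) := by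
  lift u to ℕ using hu
  lift v to ℕ using hv
  unfold cnt atO indOne
  simp [PySem.List.pyGetD_natCast, List.getD_eq_getElem?_getD]

lemma winSum_eq (office : List (List Int)) (i j k : Int)
    (hrows : ∀ row ∈ office, office.length ≤ row.length)
    (hi : 0 ≤ i) (hj : 0 ≤ j) (hk : 1 ≤ k)
    (hik : i + k ≤ (office.length : Int)) (hjk : j + k ≤ (office.length : Int)) :
    winSum (office.map prefRow) i j k = rectSum office i j k := by
  unfold winSum
  rw [foldl_add_sum _ _ k.toNat i (i + k) (by omega)]
  rw [rectSum_eq_double office i j k]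
  rw [zero_add]
  apply Finset.sum_congr rfl
  intro t ht
  simp only [Finset.mem_range] at ht
  have hr1 : 0 ≤ i + (t : Int) := by omega
  have hr2 : (i + (t : Int)).toNat < office.length := by omega
  have hmap : PySem.List.pyGetD (office.map prefRow) (i + (t : Int)) [] =
      (office.map prefRow).getD (i + (t : Int)).toNat [] := by
    rw [← Int.toNat_of_nonneg hr1]
    simp only [PySem.List.pyGetD_natCast, Int.toNat_natCast]
  have hrowget : (office.map prefRow).getD (i + (t : Int)).toNat [] =
      prefRow (office.getD (i + (t : Int)).toNat []) := by
    rw [List.getD_eq_getElem _ _ (by simpa using hr2), List.getD_eq_getElem _ _ hr2,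
      List.getElem_map]
  rw [hmap, hrowget]
  have hrowmem : office.getD (i + (t : Int)).toNat [] ∈ office := by
    rw [List.getD_eq_getElem _ _ hr2]
    exact List.getElem_mem hr2
  have hrowlen : office.length ≤ (office.getD (i + (t : Int)).toNat []).length :=
    hrows _ hrowmem
  have e1 : PySem.List.pyGetD (prefRow (office.getD (i + (t : Int)).toNat [])) (j + k) 0 =
      ∑ b ∈ Finset.range (j + k).toNat,
        indOne ((office.getD (i + (t : Int)).toNat []).getD b 0) := by
    rw [← Int.toNat_of_nonneg (by omega : (0:Int) ≤ j + k)]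
    simp only [PySem.List.pyGetD_natCast, Int.toNat_natCast]
    exact prefRow_getD _ _ (by omega)
  have e2 : PySem.List.pyGetD (prefRow (office.getD (i + (t : Int)).toNat [])) j 0 =
      ∑ b ∈ Finset.range j.toNat,
        indOne ((office.getD (i + (t : Int)).toNat []).getD b 0) := by
    rw [← Int.toNat_of_nonneg hj]
    simp only [PySem.List.pyGetD_natCast, Int.toNat_natCast]
    exact prefRow_getD _ _ (by omega)
  rw [e1, e2]
  rw [← Finset.sum_Ico_eq_sub _ (by omega : j.toNat ≤ (j + k).toNat)]
  rw [Finset.sum_Ico_eq_sum_range]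
  rw [show (j + k).toNat - j.toNat = k.toNat from by omega]
  apply Finset.sum_congr rfl
  intro s hs
  simp only [Finset.mem_range] at hs
  rw [cnt_eq_indOne office (i + (t : Int)) (j + (s : Int)) hr1 (by omega)]
  rw [show (j + (s : Int)).toNat = j.toNat + s from by omega]

-- ===== glue: both outer double loops range over the same windows =====

lemma foldl_id {α β : Type} : ∀ (l : List α) (x : β), l.foldl (fun a _ => a) x = x := by
  intro l
  induction l with
  | nil => intro x; rfl
  | cons h t ih => intro x; simpa using ih x

lemma outer_glue {β : Type} (F G : β → Int → β) (l1 l2 : List Int) (init : β)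
    (htail : ∀ (acc : β), ∀ i ∈ l2, F acc i = acc)
    (hhead : ∀ (acc : β), ∀ i ∈ l1, F acc i = G acc i) :
    (l1 ++ l2).foldl F init = l1.foldl G init := by
  have h2 : List.foldl F (List.foldl F init l1) l2 =
      List.foldl (fun (a : β) (_ : Int) => a) (List.foldl F init l1) l2 :=
    PySem.List.foldl_congr_mem l2 F (fun (a : β) (_ : Int) => a) (List.foldl F init l1)
      (fun acc x hx => htail acc x hx)
  rw [List.foldl_append, h2, foldl_id]
  exact PySem.List.foldl_congr_mem l1 F G init (fun acc x hx => hhead acc x hx)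

-- ===== VERDICT (by name: the statement is the Claim_ definition above) =====
theorem solution_spec : Claim_equal_solution := by
  unfold Claim_equal_solution
  intro office k hdom hpre
  unfold Spec_solution
  obtain ⟨hk, hsq⟩ := hpre
  by_cases hkn : (office.length : Int) < k
  · -- no k×k window fits: both programs return -1
    have hA : solution office k = -1 := by
      simp only [solution]
      have houter : ∀ (acc : Int), ∀ i ∈ PySem.List.pyRange 0 (office.length : Int) 1,
          List.foldl (fun answer j =>
            if (office.length : Int) < i + k ∨ (office.length : Int) < j + k then answer
            else max answer (heater office i j k)) acc
            (PySem.List.pyRange 0 (office.length : Int) 1) = acc := by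
        intro acc i hi
        have hi0 : 0 ≤ i := (PySem.List.mem_pyRange_one.mp hi).1
        rw [PySem.List.foldl_congr_mem _ _ (fun (a : Int) (_ : Int) => a) acc
          (fun acc2 j hj => if_pos (Or.inl (by omega)))]
        exact foldl_id _ _
      rw [PySem.List.foldl_congr_mem _ _ (fun (a : Int) (_ : Int) => a) (-1)
        (fun acc i hi => houter acc i hi)]
      exact foldl_id _ _
    have hB : solution_alt office k = -1 := by
      simp only [solution_alt]
      rw [PySem.List.pyRange_one_eq_nil (by omega)]
      rfl
    rw [hA, hB]
  · -- k ≤ n: both programs fold max over the same (n-k+1)² window sums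
    have hrows : ∀ row ∈ office, office.length ≤ row.length := by
      rcases hsq with h | h
      · exact absurd h (by omega)
      · exact h
    have hsplit : PySem.List.pyRange 0 (office.length : Int) 1 =
        PySem.List.pyRange 0 ((office.length : Int) - k + 1) 1 ++
        PySem.List.pyRange ((office.length : Int) - k + 1) (office.length : Int) 1 :=
      PySem.List.pyRange_one_append 0 _ _ (by omega) (by omega)
    have hA : solution office k =
        List.foldl (fun best i => List.foldl (fun best j => max best (rectSum office i j k)) best
          (PySem.List.pyRange 0 ((office.length : Int) - k + 1) 1)) (-1)
          (PySem.List.pyRange 0 ((office.length : Int) - k + 1) 1) := by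
      simp only [solution]
      rw [hsplit]
      apply outer_glue
      · intro acc i hi
        obtain ⟨hi1, hi2⟩ := PySem.List.mem_pyRange_one.mp hi
        rw [PySem.List.foldl_congr_mem _ _ (fun (a : Int) (_ : Int) => a) acc
          (fun acc2 j hj => if_pos (Or.inl (by omega)))]
        exact foldl_id _ _
      · intro acc i hi
        obtain ⟨hi1, hi2⟩ := PySem.List.mem_pyRange_one.mp hi
        apply outer_glue
        · intro acc2 j hj
          obtain ⟨hj1, hj2⟩ := PySem.List.mem_pyRange_one.mp hj
          exact if_pos (Or.inr (by omega))
        · intro acc2 j hj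
          obtain ⟨hj1, hj2⟩ := PySem.List.mem_pyRange_one.mp hj
          rw [if_neg (by omega : ¬ ((office.length : Int) < i + k ∨ (office.length : Int) < j + k))]
          rw [heater_eq office i j k hi1 hj1 hk (by omega) (by omega)]
    have hB : solution_alt office k =
        List.foldl (fun best i => List.foldl (fun best j => max best (rectSum office i j k)) best
          (PySem.List.pyRange 0 ((office.length : Int) - k + 1) 1)) (-1)
          (PySem.List.pyRange 0 ((office.length : Int) - k + 1) 1) := by
      simp only [solution_alt]
      apply PySem.List.foldl_congr_mem
      intro acc i hi
      obtain ⟨hi1, hi2⟩ := PySem.List.mem_pyRange_one.mp hi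
      apply PySem.List.foldl_congr_mem
      intro acc2 j hj
      obtain ⟨hj1, hj2⟩ := PySem.List.mem_pyRange_one.mp hj
      rw [winSum_eq office i j k hrows hi1 hj1 hk (by omega) (by omega)]
    rw [hA, hB]
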